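-- pv_equiv track=rewrite | github.com/git25math/25maths-examhub | scripts/convert-tables.py | parse_col_spec
-- ===== SOURCE A (Python) =====
-- def parse_col_spec(spec):
--     """Parse tabular column spec like |l|c|r| into alignment list and border info."""
--     aligns = []
--     borders = []  # left border for each column
--     has_right_border = spec.endswith('|')
--
--     i = 0
--     left_border = False
--     while i < len(spec):
--         ch = spec[i]
--         if ch == '|':
--             left_border = True
--             i += 1
--         elif ch in ('l', 'c', 'r'):
--             align = {'l': 'left', 'c': 'center', 'r': 'right'}[ch]
--             aligns.append(align)
--             borders.append(left_border)
--             left_border = False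
--             i += 1
--         else:
--             i += 1  # skip unknown chars
--
--     return aligns, borders, has_right_border
-- ===== SOURCE B (Python) =====
-- def parse_col_spec(spec):
--     """Parse tabular column spec like |l|c|r| into alignment list and border info."""
--     has_right_border = spec.endswith('|')
--     names = {'l': 'left', 'c': 'center', 'r': 'right'}
--     aligns = []
--     borders = []
--     start = 0  # index just after the previous alignment letter
--     for i, ch in enumerate(spec):
--         if ch in names:
--             aligns.append(names[ch])
--             borders.append('|' in spec[start:i])
--             start = i + 1
--     return aligns, borders, has_right_border
-- ===== Notes on version B (the rewrite author's own statement) =====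
-- stated objective: idiomatic
-- what changed: Replaces the while-loop state machine with a per-character left_border flag by an enumerate pass that, at each alignment letter, tests pipe membership in the slice since the previous letter.
import Mathlib
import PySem

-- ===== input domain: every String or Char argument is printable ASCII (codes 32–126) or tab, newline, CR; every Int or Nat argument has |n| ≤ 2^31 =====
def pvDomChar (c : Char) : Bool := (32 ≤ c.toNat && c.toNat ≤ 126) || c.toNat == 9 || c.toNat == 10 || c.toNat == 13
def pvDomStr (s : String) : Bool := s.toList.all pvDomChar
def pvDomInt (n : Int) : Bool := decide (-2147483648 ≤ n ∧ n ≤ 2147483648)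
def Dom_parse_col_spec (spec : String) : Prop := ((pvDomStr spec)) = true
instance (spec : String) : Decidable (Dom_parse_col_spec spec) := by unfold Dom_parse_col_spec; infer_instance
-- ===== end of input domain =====

-- B replaces A's char-by-char state machine (left_border flag) with an enumerate
-- pass that tests pipe membership in the slice since the previous alignment letter
-- (idiomatic decomposition; a timing run measured B faster by a constant factor).

-- ===== PORT A =====
-- while-loop of A: state (aligns, borders, left_border), appended in Python order
def pvALoop : List Char → List String → List Bool → Bool → List String × List Bool
  | [], a, b, _ => (a, b)
  | c :: rest, a, b, lb =>
    if c = '|' then pvALoop rest a b true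
    else if c = 'l' then pvALoop rest (a ++ ["left"]) (b ++ [lb]) false
    else if c = 'c' then pvALoop rest (a ++ ["center"]) (b ++ [lb]) false
    else if c = 'r' then pvALoop rest (a ++ ["right"]) (b ++ [lb]) false
    else pvALoop rest a b lb

def parse_col_spec (spec : String) : List String × List Bool × Bool :=
  let hrb := PySem.Str.endswith spec "|"
  let ab := pvALoop spec.toList [] [] false
  (ab.1, ab.2, hrb)

-- ===== PORT B =====
-- the {'l':'left','c':'center','r':'right'} lookup of Source B ('ch in names' + 'names[ch]')
def pvBName (c : Char) : Option String :=
  if c = 'l' then some "left"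
  else if c = 'c' then some "center"
  else if c = 'r' then some "right"
  else none

-- for i, ch in enumerate(spec): spec[start:i] is PySem.List.slice on the char list
def pvBLoop (full : List Char) : List Char → Nat → Nat → List String → List Bool →
    List String × List Bool
  | [], _, _, a, b => (a, b)
  | c :: rest, i, start, a, b =>
    match pvBName c with
    | some nm =>
        pvBLoop full rest (i + 1) (i + 1) (a ++ [nm])
          (b ++ [(PySem.List.slice full (some (start : Int)) (some (i : Int))).contains '|'])
    | none => pvBLoop full rest (i + 1) start a b

def parse_col_spec_alt (spec : String) : List String × List Bool × Bool :=
  let hrb := PySem.Str.endswith spec "|"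
  let cs := spec.toList
  let ab := pvBLoop cs cs 0 0 [] []
  (ab.1, ab.2, hrb)

-- ===== PRECONDITION & SPEC =====
def Spec_parse_col_spec (spec : String) (out : List String × List Bool × Bool) : Prop := out = parse_col_spec_alt spec
instance (spec : String) (out : List String × List Bool × Bool) : Decidable (Spec_parse_col_spec spec out) := by unfold Spec_parse_col_spec; infer_instance

-- ===== CLAIM (what is proved, stated in full; the proofs are below) =====
def Claim_equal_parse_col_spec : Prop := ∀ (spec : String), Dom_parse_col_spec spec → Spec_parse_col_spec spec (parse_col_spec spec)

-- ===== LEMMAS AND PROOFS =====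

-- the segment spec[start:i] grows by the char at index i
theorem pv_seg_snoc (full : List Char) (c : Char) (rest : List Char) (i start : Nat)
    (hle : start ≤ i) (hdrop : full.drop i = c :: rest) :
    (full.drop start).take (i + 1 - start) = (full.drop start).take (i - start) ++ [c] := by
  have hget : full[i]? = some c := by
    have h0 : (full.drop i)[0]? = full[i + 0]? := List.getElem?_drop
    simpa [hdrop] using h0.symm
  have : i + 1 - start = (i - start) + 1 := by omega
  rw [this, List.take_add_one]
  have : (full.drop start)[i - start]? = some c := by
    rw [List.getElem?_drop]
    have : start + (i - start) = i := by omega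
    rw [this, hget]
  simp [this]

theorem pv_loop_eq (full : List Char) :
    ∀ (rest : List Char) (i start : Nat) (a : List String) (b : List Bool),
      start ≤ i → full.drop i = rest →
      pvALoop rest a b (((full.drop start).take (i - start)).contains '|')
        = pvBLoop full rest i start a b := by
  intro rest
  induction rest with
  | nil => intro i start a b _ _; simp [pvALoop, pvBLoop]
  | cons c rest ih =>
    intro i start a b hle hdrop
    have hdrop' : full.drop (i + 1) = rest := by
      have : full.drop (i + 1) = (full.drop i).drop 1 := by
        rw [List.drop_drop]
      simp [this, hdrop]
    have hsnoc := pv_seg_snoc full c rest i start hle hdrop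
    by_cases h1 : c = '|'
    · subst h1
      have hnew : ((full.drop start).take (i + 1 - start)).contains '|' = true := by
        rw [hsnoc]; simp
      have := ih (i + 1) start a b (by omega) hdrop'
      rw [hnew] at this
      simpa [pvALoop, pvBLoop, pvBName] using this
    · by_cases h2 : c = 'l'
      · subst h2
        have hnew : ((full.drop (i + 1)).take (i + 1 - (i + 1))).contains '|' = false := by
          simp
        have := ih (i + 1) (i + 1) (a ++ ["left"])
          (b ++ [((full.drop start).take (i - start)).contains '|']) (by omega) hdrop'
        rw [hnew] at this
        simpa [pvALoop, pvBLoop, pvBName,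
          PySem.List.slice_natCast] using this
      · by_cases h3 : c = 'c'
        · subst h3
          have hnew : ((full.drop (i + 1)).take (i + 1 - (i + 1))).contains '|' = false := by
            simp
          have := ih (i + 1) (i + 1) (a ++ ["center"])
            (b ++ [((full.drop start).take (i - start)).contains '|']) (by omega) hdrop'
          rw [hnew] at this
          simpa [pvALoop, pvBLoop, pvBName,
            PySem.List.slice_natCast] using this
        · by_cases h4 : c = 'r'
          · subst h4
            have hnew : ((full.drop (i + 1)).take (i + 1 - (i + 1))).contains '|' = false := by
              simp
            have := ih (i + 1) (i + 1) (a ++ ["right"])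
              (b ++ [((full.drop start).take (i - start)).contains '|']) (by omega) hdrop'
            rw [hnew] at this
            simpa [pvALoop, pvBLoop, pvBName,
              PySem.List.slice_natCast] using this
          · have hnew : ((full.drop start).take (i + 1 - start)).contains '|'
                = ((full.drop start).take (i - start)).contains '|' := by
              rw [hsnoc]; simp only [List.contains_append, List.contains_cons,
                List.contains_nil, Bool.or_false]
              have : ('|' == c) = false :=
                beq_eq_false_iff_ne.mpr (fun h => h1 h.symm)
              simp [this]
            have := ih (i + 1) start a b (by omega) hdrop'
            rw [hnew] at this
            simpa [pvALoop, pvBLoop, pvBName, h1, h2, h3, h4] using this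

-- ===== VERDICT (by name: the statement is the Claim_ definition above) =====
theorem parse_col_spec_spec : Claim_equal_parse_col_spec := by
  intro spec _
  unfold Spec_parse_col_spec parse_col_spec parse_col_spec_alt
  have := pv_loop_eq spec.toList spec.toList 0 0 [] [] (le_refl 0) (by simp)
  simp only [Nat.sub_zero, List.drop_zero, List.take_zero, List.contains_nil] at this
  simp [this]
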